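-- pv_equiv track=rewrite | github.com/k-shibuki/lyra | src/extractor/quality_analyzer.py | _count_phrase_repetitions
-- ===== SOURCE A (Python) =====
-- from collections import Counter
--
-- def _count_phrase_repetitions(text: str) -> int:
--     """Count repeated phrases (4+ words)."""
--     # Extract phrases of 4-8 words
--     words = text.lower().split()
--     phrases = []
--
--     for length in range(4, 9):
--         for i in range(len(words) - length + 1):
--             phrase = " ".join(words[i : i + length])
--             phrases.append(phrase)
--
--     counter = Counter(phrases)
--     return sum(1 for count in counter.values() if count > 1)
-- ===== SOURCE B (Python) =====
-- def _count_phrase_repetitions(text: str) -> int: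
--     """Count repeated phrases (4+ words)."""
--     words = text.lower().split()
--     phrases = sorted(
--         " ".join(words[i : i + length])
--         for length in range(4, 9)
--         for i in range(len(words) - length + 1)
--     )
--     # sorted order groups equal phrases into adjacent runs;
--     # count the runs of length > 1 with a run-skipping scan
--     total = 0
--     n = len(phrases)
--     j = 0
--     while j < n:
--         k = j + 1
--         while k < n and phrases[k] == phrases[j]:
--             k += 1
--         if k - j > 1:
--             total += 1
--         j = k
--     return total
-- ===== Notes on version B (the rewrite author's own statement) =====
-- stated objective: alternative
-- what changed: Replaces the Counter frequency table by sort-then-scan: the phrase list is sorted so equal phrases become adjacent runs, and a run-skipping scan counts runs of length > 1.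
import Mathlib
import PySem

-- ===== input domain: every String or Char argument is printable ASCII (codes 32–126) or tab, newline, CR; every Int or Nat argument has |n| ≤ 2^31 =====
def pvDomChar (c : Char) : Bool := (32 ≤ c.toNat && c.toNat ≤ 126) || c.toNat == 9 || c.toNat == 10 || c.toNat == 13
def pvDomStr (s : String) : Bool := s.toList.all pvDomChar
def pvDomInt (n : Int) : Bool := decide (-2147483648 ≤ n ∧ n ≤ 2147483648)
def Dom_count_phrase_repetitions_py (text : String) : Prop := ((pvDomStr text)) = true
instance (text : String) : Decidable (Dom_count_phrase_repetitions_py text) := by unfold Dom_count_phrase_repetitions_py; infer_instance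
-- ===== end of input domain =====

-- B replaces the Counter frequency table by sort-then-scan: the phrase list is sorted so
-- equal phrases form adjacent runs, and a run-skipping scan counts runs of length > 1.

-- ===== PORT A =====
def count_phrase_repetitions_py (text : String) : Int :=
  let words := PySem.Str.split₀ (PySem.Str.lower text)
  let phrases : List String := (PySem.List.pyRange 4 9 1).foldl (fun phrases length =>
    (PySem.List.pyRange 0 ((words.length : Int) - length + 1) 1).foldl (fun phrases i =>
      phrases ++ [PySem.Str.join " " (PySem.List.slice words (some i) (some (i + length)))])
      phrases) []
  let counter := PySem.Dict.counter phrases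
  (PySem.Dict.values counter).foldl (fun acc count => if 1 < count then acc + 1 else acc) 0

-- ===== PORT B =====
-- the run-skipping scan of Source B: outer while over run starts, inner while (takeWhile /
-- dropWhile) skipping the elements equal to the run's first element
def pvRuns : List String → Int
  | [] => 0
  | a :: t =>
    (if (t.takeWhile (fun x => x == a)).isEmpty then 0 else 1)
      + pvRuns (t.dropWhile (fun x => x == a))
termination_by l => l.length
decreasing_by
  have := List.length_dropWhile_le (fun x => x == a) t
  simp only [List.length_cons]
  omega

def count_phrase_repetitions_py_alt (text : String) : Int :=
  let words := PySem.Str.split₀ (PySem.Str.lower text)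
  let phrases := PySem.List.sorted
    ((PySem.List.pyRange 4 9 1).flatMap (fun length =>
      (PySem.List.pyRange 0 ((words.length : Int) - length + 1) 1).map (fun i =>
        PySem.Str.join " " (PySem.List.slice words (some i) (some (i + length))))))
    (fun x => x) false
  pvRuns phrases

-- ===== PRECONDITION & SPEC =====
def Spec_count_phrase_repetitions_py (text : String) (out : Int) : Prop := out = count_phrase_repetitions_py_alt text
instance (text : String) (out : Int) : Decidable (Spec_count_phrase_repetitions_py text out) := by unfold Spec_count_phrase_repetitions_py; infer_instance

-- ===== CLAIM =====
def Claim_equal_count_phrase_repetitions_py : Prop := ∀ (text : String), Dom_count_phrase_repetitions_py text → Spec_count_phrase_repetitions_py text (count_phrase_repetitions_py text)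

-- ===== LEMMAS AND PROOFS =====

-- the common sequence of phrases both programs enumerate
def pvPhrases (words : List String) : List String :=
  (PySem.List.pyRange 4 9 1).flatMap (fun length =>
    (PySem.List.pyRange 0 ((words.length : Int) - length + 1) 1).map (fun i =>
      PySem.Str.join " " (PySem.List.slice words (some i) (some (i + length)))))

-- number of distinct elements of l occurring more than once
def pvDupCount (l : List String) : Int :=
  ((l.toFinset.filter (fun x => 1 < l.count x)).card : Int)

lemma a_phrases (words : List String) :
    ((PySem.List.pyRange 4 9 1).foldl (fun phrases length =>
      (PySem.List.pyRange 0 ((words.length : Int) - length + 1) 1).foldl (fun phrases i =>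
        phrases ++ [PySem.Str.join " " (PySem.List.slice words (some i) (some (i + length)))])
        phrases) ([] : List String)) = pvPhrases words := by
  unfold pvPhrases
  simp only [PySem.List.foldl_append_singleton_eq_map, PySem.List.foldl_append_eq_flatMap,
    List.nil_append]

lemma a_value (L : List String) :
    ((PySem.Dict.counter L).values).foldl (fun acc c => if 1 < c then acc + 1 else acc) (0 : Int)
      = pvDupCount L := by
  have hv : (PySem.Dict.counter L).values
      = (PySem.Set.ofList L).map (fun k => (L.count k : Int)) := by
    simp only [PySem.Dict.values, PySem.Dict.items_counter, List.map_map]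
    rfl
  rw [hv, PySem.List.foldl_ite_add_one, List.countP_map, zero_add]
  have hfil : ∀ x, x ∈ (PySem.Set.ofList L).filter (fun k => decide (1 < (L.count k : Int)))
      ↔ x ∈ L.toFinset.filter (fun x => 1 < L.count x) := by
    intro x
    rw [List.mem_filter, Finset.mem_filter, PySem.Set.mem_ofList, List.mem_toFinset]
    constructor
    · rintro ⟨h1, h2⟩; simp only [decide_eq_true_eq] at h2; exact ⟨h1, by exact_mod_cast h2⟩
    · rintro ⟨h1, h2⟩; exact ⟨h1, by simp; exact_mod_cast h2⟩
  have hnod : ((PySem.Set.ofList L).filter (fun k => decide (1 < (L.count k : Int)))).Nodup :=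
    (PySem.Set.nodup_ofList L).filter _
  rw [List.countP_eq_length_filter]
  simp only [Function.comp_def]
  unfold pvDupCount
  congr 1
  rw [← List.toFinset_card_of_nodup hnod]
  congr 1
  ext a
  rw [List.mem_toFinset]
  exact hfil a

lemma pvDupCount_perm {l l' : List String} (h : l.Perm l') : pvDupCount l = pvDupCount l' := by
  unfold pvDupCount
  congr 1
  have ht : l.toFinset = l'.toFinset := List.toFinset_eq_of_perm _ _ h
  congr 1
  ext x
  simp only [Finset.mem_filter, ht, h.count_eq]

lemma not_mem_dropWhile_self : ∀ (a : String) (t : List String), (∀ y ∈ t, a ≤ y) →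
    t.Pairwise (· ≤ ·) → a ∉ t.dropWhile (fun x => x == a) := by
  intro a t
  induction t with
  | nil => intro _ _ h; exact absurd h List.not_mem_nil
  | cons b r ih =>
    intro hle hp
    by_cases hb : (b == a) = true
    · rw [List.dropWhile_cons, if_pos hb]
      exact ih (fun y hy => hle y (List.mem_cons_of_mem b hy)) (List.pairwise_cons.mp hp).2
    · rw [List.dropWhile_cons, if_neg hb]
      intro hmem
      have hba : b ≠ a := by simpa using hb
      have hab : a ≤ b := hle b List.mem_cons_self
      rcases List.mem_cons.mp hmem with rfl | hr
      · exact hba rfl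
      · have : b ≤ a := (List.pairwise_cons.mp hp).1 a hr
        exact hba (le_antisymm this hab)

lemma runs_eq : ∀ (n : ℕ) (l : List String), l.length ≤ n → l.Pairwise (· ≤ ·) →
    pvRuns l = pvDupCount l := by
  intro n
  induction n with
  | zero =>
    intro l hn _
    have : l = [] := List.eq_nil_of_length_eq_zero (Nat.le_zero.mp hn)
    subst this
    simp [pvRuns, pvDupCount]
  | succ m ih =>
    intro l hn hp
    match l with
    | [] => simp [pvRuns, pvDupCount]
    | a :: t =>
      set s1 := t.takeWhile (fun x => x == a) with hs1
      set s2 := t.dropWhile (fun x => x == a) with hs2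
      have hsplit : t = s1 ++ s2 := (List.takeWhile_append_dropWhile).symm
      have hs1a : ∀ x ∈ s1, x = a := by
        intro x hx
        have := List.mem_takeWhile_imp hx
        simpa using this
      have hale : ∀ y ∈ t, a ≤ y := fun y hy => (List.pairwise_cons.mp hp).1 y hy
      have htp : t.Pairwise (· ≤ ·) := (List.pairwise_cons.mp hp).2
      have hs2p : s2.Pairwise (· ≤ ·) := by
        rw [hsplit] at htp
        exact (List.pairwise_append.mp htp).2.1
      have has2 : a ∉ s2 := not_mem_dropWhile_self a t hale htp
      -- counts
      have hcount_a : (a :: t).count a = 1 + s1.length := by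
        rw [hsplit]
        have hcs1 : s1.count a = s1.length :=
          List.count_eq_length.mpr (fun x hx => by simp [hs1a x hx])
        have hcs2 : s2.count a = 0 := List.count_eq_zero.mpr has2
        simp [List.count_append, hcs1, hcs2]
        omega
      have hcount_ne : ∀ x, x ≠ a → (a :: t).count x = s2.count x := by
        intro x hx
        rw [hsplit]
        have hcs1 : s1.count x = 0 := List.count_eq_zero.mpr (fun hm => hx (hs1a x hm))
        simp [List.count_append, hcs1, Ne.symm hx]
      -- toFinset
      have htf : (a :: t).toFinset = insert a s2.toFinset := by
        rw [hsplit]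
        simp only [List.toFinset_cons, List.toFinset_append]
        have : s1.toFinset ⊆ {a} := by
          intro x hx
          rw [List.mem_toFinset] at hx
          simp [hs1a x hx]
        ext x
        simp only [Finset.mem_insert, Finset.mem_union, List.mem_toFinset]
        constructor
        · rintro (rfl | h | h)
          · exact Or.inl rfl
          · have := this (List.mem_toFinset.mpr h); simp at this; exact Or.inl this
          · exact Or.inr h
        · rintro (rfl | h)
          · exact Or.inl rfl
          · exact Or.inr (Or.inr h)
      -- the filtered finset splits
      have hfilter : (a :: t).toFinset.filter (fun x => 1 < (a :: t).count x)
          = (if s1.isEmpty then (∅ : Finset String) else {a})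
            ∪ s2.toFinset.filter (fun x => 1 < s2.count x) := by
        rw [htf]
        ext x
        simp only [Finset.mem_filter, Finset.mem_insert, Finset.mem_union, List.mem_toFinset]
        by_cases hxa : x = a
        · subst hxa
          have hxs2 : x ∉ s2.toFinset := fun h => has2 (List.mem_toFinset.mp h)
          constructor
          · rintro ⟨-, hc⟩
            rw [hcount_a] at hc
            have : ¬ s1.isEmpty := by
              intro he
              rw [List.isEmpty_iff] at he
              rw [he] at hc; simp at hc
            simp [this]
          · intro h
            rcases h with h | h
            · split_ifs at h with hemp
              · exact absurd h (Finset.notMem_empty x)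
              · refine ⟨Or.inl rfl, ?_⟩
                rw [hcount_a]
                have : s1 ≠ [] := fun he => hemp (by rw [he]; rfl)
                have : 0 < s1.length := List.length_pos_iff.mpr this
                omega
            · exact absurd (List.mem_toFinset.mpr h.1) hxs2
        · rw [hcount_ne x hxa]
          constructor
          · rintro ⟨h | h, hc⟩
            · exact absurd h hxa
            · exact Or.inr ⟨h, hc⟩
          · rintro (h | ⟨h1, h2⟩)
            · split_ifs at h with hemp
              · exact absurd h (Finset.notMem_empty x)
              · simp at h; exact absurd h hxa
            · exact ⟨Or.inr h1, h2⟩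
      have hdisj : Disjoint (if s1.isEmpty then (∅ : Finset String) else {a})
          (s2.toFinset.filter (fun x => 1 < s2.count x)) := by
        split_ifs
        · exact Finset.disjoint_empty_left _
        · rw [Finset.disjoint_left]
          intro x hx
          simp at hx
          subst hx
          intro hmem
          exact has2 (List.mem_toFinset.mp (Finset.mem_filter.mp hmem).1)
      have hlen2 : s2.length ≤ m := by
        have h1 : s2.length ≤ t.length := List.length_dropWhile_le _ t
        have h2 : t.length ≤ m := by
          simpa [List.length_cons] using Nat.lt_succ_iff.mp (Nat.lt_of_lt_of_le (by simp) hn)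
        omega
      have hih := ih s2 hlen2 hs2p
      rw [pvRuns, ← hs1, ← hs2, hih]
      unfold pvDupCount
      rw [hfilter, Finset.card_union_of_disjoint hdisj]
      split_ifs <;> simp

-- ===== VERDICT =====
theorem count_phrase_repetitions_py_spec : Claim_equal_count_phrase_repetitions_py := by
  intro text _
  unfold Spec_count_phrase_repetitions_py count_phrase_repetitions_py count_phrase_repetitions_py_alt
  simp only [a_phrases]
  set L := pvPhrases (PySem.Str.split₀ (PySem.Str.lower text)) with hL
  rw [a_value]
  have hB : (PySem.List.sorted
      ((PySem.List.pyRange 4 9 1).flatMap (fun length =>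
        (PySem.List.pyRange 0 (((PySem.Str.split₀ (PySem.Str.lower text)).length : Int) - length + 1) 1).map (fun i =>
          PySem.Str.join " " (PySem.List.slice (PySem.Str.split₀ (PySem.Str.lower text)) (some i) (some (i + length))))))
      (fun x => x) false) = PySem.List.sorted L (fun x => x) false := rfl
  rw [hB]
  have hperm : (PySem.List.sorted L (fun x => x) false).Perm L := PySem.List.sorted_perm L _ _
  have hpw : (PySem.List.sorted L (fun x => x) false).Pairwise (· ≤ ·) :=
    PySem.List.sorted_pairwise L (fun x => x)
  rw [runs_eq (PySem.List.sorted L (fun x => x) false).length _ le_rfl hpw,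
    pvDupCount_perm hperm]
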